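-- pv_equiv track=rewrite | github.com/sharma-anubhav/CrackingTheCodingInterview-DSA | ch38(SlidingWindow)/38.4.py | has_enduring_best_seller_streak
-- ===== SOURCE A (Python) =====
-- from collections import defaultdict, deque
--
-- k = 3
--
-- class Window:
--     def __init__(self, l, r):
--         self.l = l
--         self.r = r
--         self.internal = defaultdict(int)
--
-- def has_enduring_best_seller_streak(arr, k):
--     cur_window = Window(0,0)
--     while cur_window.r< len(arr):
--         cur_window.internal[arr[cur_window.r]]+=1
--         cur_window.r+=1
--         if cur_window.r-cur_window.l == k:
--             if len(cur_window.internal.keys())==1: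
--                 return True
--             cur_window.internal[arr[cur_window.l]]-=1
--             if cur_window.internal[arr[cur_window.l]] == 0:
--                 del cur_window.internal[arr[cur_window.l]]
--             cur_window.l+=1
--     return False
-- ===== SOURCE B (Python) =====
-- def has_enduring_best_seller_streak(arr, k):
--     run = 0
--     prev = None
--     for x in arr:
--         run = run + 1 if prev == x else 1
--         if run == k:
--             return True
--         prev = x
--     return False
-- ===== Notes on version B (the rewrite author's own statement) =====
-- stated objective: simpler
-- what changed: Replaced the sliding Window object with its defaultdict of element counts by a single pass that keeps one integer: the length of the current run of equal consecutive elements, returning True when it reaches exactly k.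
import Mathlib
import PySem

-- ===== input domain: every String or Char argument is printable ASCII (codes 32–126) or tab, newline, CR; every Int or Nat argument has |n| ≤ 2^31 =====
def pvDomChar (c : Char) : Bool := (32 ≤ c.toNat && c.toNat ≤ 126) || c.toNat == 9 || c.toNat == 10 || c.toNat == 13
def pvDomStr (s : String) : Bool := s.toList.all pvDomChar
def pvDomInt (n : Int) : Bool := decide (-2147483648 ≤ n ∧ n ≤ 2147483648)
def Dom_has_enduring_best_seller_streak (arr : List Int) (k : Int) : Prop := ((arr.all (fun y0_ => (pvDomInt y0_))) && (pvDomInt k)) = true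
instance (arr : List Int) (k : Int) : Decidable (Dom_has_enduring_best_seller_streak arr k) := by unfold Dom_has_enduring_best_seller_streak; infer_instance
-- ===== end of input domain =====

-- B replaces A's sliding Window object and count dict by a single pass keeping the length of
-- the current run of equal consecutive elements (objective: simpler).

-- ===== PORT A =====
-- A's while loop over (l, r, internal dict); l, r are the nonnegative window bounds.
def pvA_loop (arr : List Int) (k : Int) (l r : Nat) (d : PySem.Dict Int Int) : Bool :=
  if h : r < arr.length then
    -- cur_window.internal[arr[cur_window.r]] += 1  (defaultdict(int))
    let d1 := d.modify (PySem.List.pyGetD arr (r : Int) 0) 0 (· + 1)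
    -- cur_window.r += 1
    if ((r : Int) + 1) - (l : Int) = k then
      if d1.keys.length = 1 then true
      else
        let x0 := PySem.List.pyGetD arr (l : Int) 0
        let d2 := d1.modify x0 0 (· - 1)
        if d2.getD x0 0 = 0 then pvA_loop arr k (l + 1) (r + 1) (d2.erase x0)
        else pvA_loop arr k (l + 1) (r + 1) d2
    else pvA_loop arr k l (r + 1) d1
  else false
termination_by arr.length - r
decreasing_by all_goals omega

def has_enduring_best_seller_streak (arr : List Int) (k : Int) : Bool :=
  pvA_loop arr k 0 0 PySem.Dict.empty

-- ===== PORT B =====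
-- B's for loop: state (prev, run); `prev == x` is Python's None/int comparison = Option equality.
def pvB_loop (k : Int) : List Int → Option Int → Int → Bool
  | [], _, _ => false
  | x :: xs, prev, run =>
    let run1 := if prev = some x then run + 1 else 1
    if run1 = k then true else pvB_loop k xs (some x) run1

def has_enduring_best_seller_streak_alt (arr : List Int) (k : Int) : Bool :=
  pvB_loop k arr none 0

-- ===== PRECONDITION & SPEC =====
def Spec_has_enduring_best_seller_streak (arr : List Int) (k : Int) (out : Bool) : Prop := out = has_enduring_best_seller_streak_alt arr k
instance (arr : List Int) (k : Int) (out : Bool) : Decidable (Spec_has_enduring_best_seller_streak arr k out) := by unfold Spec_has_enduring_best_seller_streak; infer_instance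

-- ===== CLAIM (what is proved, stated in full; the proofs are below) =====
def Claim_equal_has_enduring_best_seller_streak : Prop := ∀ (arr : List Int) (k : Int), Dom_has_enduring_best_seller_streak arr k → Spec_has_enduring_best_seller_streak arr k (has_enduring_best_seller_streak arr k)

-- ===== LEMMAS AND PROOFS =====

-- length of the maximal constant prefix
def hrun : List Int → Nat
  | [] => 0
  | [_] => 1
  | x :: y :: t => if x = y then hrun (y :: t) + 1 else 1

lemma hrun_cons (x : Int) (l : List Int) :
    hrun (x :: l) = if l.head? = some x then hrun l + 1 else 1 := by
  cases l with
  | nil => simp [hrun]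
  | cons y t =>
    simp only [hrun, List.head?_cons, Option.some.injEq]
    by_cases h : x = y
    · simp [h]
    · rw [if_neg h, if_neg (fun hyx => h hyx.symm)]

lemma hrun_le_length (l : List Int) : hrun l ≤ l.length := by
  induction l with
  | nil => simp [hrun]
  | cons x t ih =>
    rw [hrun_cons]
    by_cases h : t.head? = some x <;> simp [h] <;> omega

-- allEq: every two elements equal
def allEq (l : List Int) : Prop := ∀ a ∈ l, ∀ b ∈ l, a = b

lemma allEq_take_iff_le_hrun (k : Nat) (l : List Int) (hk : 1 ≤ k) (hl : k ≤ l.length) :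
    allEq (l.take k) ↔ k ≤ hrun l := by
  induction l generalizing k with
  | nil => simp at hl; omega
  | cons x t ih =>
    rcases Nat.lt_or_ge 1 k with h2 | h2
    · -- 2 ≤ k
      cases t with
      | nil => simp at hl; omega
      | cons y s =>
        rw [hrun_cons]
        simp only [List.head?_cons, Option.some.injEq]
        have htk : (x :: y :: s).take k = x :: ((y :: s).take (k - 1)) := by
          obtain ⟨m, rfl⟩ : ∃ m, k = m + 1 := ⟨k - 1, by omega⟩
          simp [List.take_succ_cons]
        by_cases hxy : y = x
        · obtain rfl : x = y := hxy.symm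
          rw [if_pos rfl]
          have hrec := ih (k - 1) (by omega) (by simp at hl ⊢; omega)
          rw [htk]
          constructor
          · intro hall
            have hsub : allEq ((x :: s).take (k - 1)) := by
              intro a ha b hb
              exact hall a (List.mem_cons_of_mem _ ha) b (List.mem_cons_of_mem _ hb)
            have := hrec.mp hsub
            omega
          · intro hle
            have hall := hrec.mpr (by omega)
            have hxmem : x ∈ (x :: s).take (k - 1) := by
              obtain ⟨m, hm⟩ : ∃ m, k - 1 = m + 1 := ⟨k - 2, by omega⟩
              rw [hm]; simp [List.take_succ_cons]
            have hx : ∀ c ∈ (x :: s).take (k - 1), c = x := fun c hc => hall c hc x hxmem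
            intro a ha b hb
            rcases List.mem_cons.mp ha with ha | ha <;> rcases List.mem_cons.mp hb with hb | hb
            · rw [ha, hb]
            · rw [ha, hx b hb]
            · rw [hx a ha, hb]
            · rw [hx a ha, hx b hb]
        · rw [if_neg hxy]
          constructor
          · intro hall
            exfalso
            apply hxy
            have hxmem : x ∈ (x :: y :: s).take k := by
              obtain ⟨m, hm⟩ : ∃ m, k = m + 1 := ⟨k - 1, by omega⟩
              rw [hm]; simp [List.take_succ_cons]
            have hymem : y ∈ (x :: y :: s).take k := by
              obtain ⟨m, hm⟩ : ∃ m, k = m + 2 := ⟨k - 2, by omega⟩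
              rw [hm]; simp [List.take_succ_cons]
            exact hall y hymem x hxmem
          · intro h; omega
    · -- k = 1
      have hk1 : k = 1 := by omega
      subst hk1
      have h1 : 1 ≤ hrun (x :: t) := by rw [hrun_cons]; split_ifs <;> omega
      simp only [List.take_succ_cons, List.take_zero]
      constructor
      · intro _; exact h1
      · intro _ a ha b hb
        simp at ha hb; omega

-- Dict.erase lemmas (PySem has none for erase; proved from the definition)
lemma dict_keys_erase (d : PySem.Dict Int Int) (k : Int) :
    (d.erase k).keys = d.keys.filter (fun a => !(a == k)) := by
  show (d.items.filter _).map _ = (d.items.map _).filter _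
  induction d.items with
  | nil => rfl
  | cons p t ih =>
    by_cases h : p.1 = k <;> simp [List.filter_cons, h, ih]

lemma dict_getD_erase (d : PySem.Dict Int Int) (k k' : Int) (d0 : Int) :
    (d.erase k).getD k' d0 = if k' = k then d0 else d.getD k' d0 := by
  show (Option.map _ (List.find? _ (d.items.filter _))).getD d0 = _
  by_cases h : k' = k
  · subst h
    have : List.find? (fun p => p.1 == k') (d.items.filter (fun p => !(p.1 == k'))) = none := by
      rw [List.find?_eq_none]
      intro p hp
      simp at hp
      simp [hp.2]
    simp [this]
  · have : List.find? (fun p => p.1 == k') (d.items.filter (fun p => !(p.1 == k))) =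
        List.find? (fun p => p.1 == k') d.items := by
      induction d.items with
      | nil => rfl
      | cons p t ih =>
        by_cases hp : p.1 = k
        · rw [List.filter_cons_of_neg (by simp [hp])]
          rw [List.find?_cons_of_neg (by simp [hp]; omega)]
          exact ih
        · rw [List.filter_cons_of_pos (by simp [hp])]
          by_cases hp' : p.1 = k'
          · rw [List.find?_cons_of_pos (by simp [hp']), List.find?_cons_of_pos (by simp [hp'])]
          · rw [List.find?_cons_of_neg (by simp [hp']), List.find?_cons_of_neg (by simp [hp'])]
            exact ih
    simp [PySem.Dict.getD, PySem.Dict.get?, this, h]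

-- keys of length 1 ↔ the window is nonempty and constant
lemma keys_length_one_iff (ks : List Int) (w : List Int)
    (hnd : ks.Nodup) (hm : ∀ y, y ∈ ks ↔ y ∈ w) (hw : w ≠ []) :
    ks.length = 1 ↔ allEq w := by
  constructor
  · intro h1
    obtain ⟨a, ha⟩ : ∃ a, ks = [a] := by
      cases ks with
      | nil => simp at h1
      | cons a t => cases t with
        | nil => exact ⟨a, rfl⟩
        | cons b s => simp at h1
    intro x hx y hy
    have hx' := (hm x).mpr hx
    have hy' := (hm y).mpr hy
    rw [ha] at hx' hy'; simp at hx' hy'; omega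
  · intro hall
    obtain ⟨a, hamem⟩ : ∃ a, a ∈ w := by
      cases w with
      | nil => exact absurd rfl hw
      | cons a t => exact ⟨a, by simp⟩
    have hsub : ∀ y ∈ ks, y = a := fun y hy => hall y ((hm y).mp hy) a hamem
    have haks : a ∈ ks := (hm a).mpr hamem
    cases ks with
    | nil => simp at haks
    | cons b t =>
      have hb : b = a := hsub b (by simp)
      have ht : t = [] := by
        cases t with
        | nil => rfl
        | cons c s =>
          exfalso
          have hc : c = a := hsub c (by simp)
          have := hnd
          simp [hb, hc] at this
      simp [ht]

-- k ≤ 0: both loops return false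
lemma pvA_loop_false_of_nonpos (arr : List Int) (k : Int) (hk : k ≤ 0) :
    ∀ n r l d, arr.length - r = n → l ≤ r → pvA_loop arr k l r d = false := by
  intro n
  induction n with
  | zero =>
    intro r l d hn hlr
    rw [pvA_loop]
    simp only [dif_neg (by omega : ¬ r < arr.length)]
  | succ m ih =>
    intro r l d hn hlr
    rw [pvA_loop]
    have hr : r < arr.length := by omega
    simp only [dif_pos hr]
    rw [if_neg (by omega : ¬ ((r : Int) + 1) - (l : Int) = k)]
    exact ih (r + 1) l _ (by omega) (by omega)

lemma pvB_loop_false_of_nonpos (k : Int) (hk : k ≤ 0) :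
    ∀ xs prev run, 0 ≤ run → pvB_loop k xs prev run = false := by
  intro xs
  induction xs with
  | nil => intro prev run _; rfl
  | cons x t ih =>
    intro prev run hrun0
    show (if (if prev = some x then run + 1 else 1) = k then true
          else pvB_loop k t (some x) (if prev = some x then run + 1 else 1)) = false
    rw [if_neg (by split_ifs <;> omega)]
    exact ih (some x) _ (by split_ifs <;> omega)

-- main coupled invariant, k ≥ 1
lemma loop_eq (arr : List Int) (k : Int) (hk : 1 ≤ k) :
    ∀ n r l (d : PySem.Dict Int Int) (run : Int), arr.length - r = n →
    r ≤ arr.length → l ≤ r →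
    ((r : Int) - (l : Int) = min (r : Int) (k - 1)) →
    d.keys.Nodup →
    (∀ y, y ∈ d.keys ↔ y ∈ (arr.take r).drop l) →
    (∀ y, d.getD y 0 = (((arr.take r).drop l).count y : Int)) →
    run = (hrun (arr.take r).reverse : Int) →
    run < k →
    pvA_loop arr k l r d = pvB_loop k (arr.drop r) (arr.take r).reverse.head? run := by
  intro n
  induction n with
  | zero =>
    intro r l d run hn hr hlr _ _ _ _ _ _
    rw [pvA_loop]
    rw [dif_neg (by omega : ¬ r < arr.length)]
    rw [List.drop_eq_nil_of_le (by omega)]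
    rfl
  | succ m ih =>
    intro r l d run hn hrlen hlr hwin hnd hm hcnt hrq hrunk
    have hr : r < arr.length := by omega
    set x := arr[r] with hx
    -- fixed prefixes / windows
    have htake : arr.take (r + 1) = arr.take r ++ [x] := by
      rw [List.take_add_one]
      simp [List.getElem?_eq_getElem hr, hx]
    have hlen_take : (arr.take r).length = r := by simp; omega
    have hdropr : arr.drop r = x :: arr.drop (r + 1) := List.drop_eq_getElem_cons hr
    -- unfold A one step
    rw [pvA_loop]
    simp only [dif_pos hr]
    have hget_r : PySem.List.pyGetD arr (r : Int) 0 = x := by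
      rw [PySem.List.pyGetD_natCast]
      simp [List.getD, List.getElem?_eq_getElem hr, hx]
    rw [hget_r]
    set d1 := d.modify x 0 (· + 1) with hd1
    -- unfold B one step
    rw [hdropr]
    show _ = (if (if (arr.take r).reverse.head? = some x then run + 1 else 1) = k then true
          else pvB_loop k (arr.drop (r+1)) (some x) (if (arr.take r).reverse.head? = some x then run + 1 else 1))
    set run1 : Int := if (arr.take r).reverse.head? = some x then run + 1 else 1 with hrun1
    -- run1 is hrun of the new reversed prefix
    have hrev1 : (arr.take (r+1)).reverse = x :: (arr.take r).reverse := by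
      rw [htake]; simp
    have hrun1_eq : run1 = (hrun (arr.take (r+1)).reverse : Int) := by
      rw [hrev1, hrun_cons, hrun1]
      by_cases hh : (arr.take r).reverse.head? = some x
      · rw [if_pos hh, if_pos hh, hrq]; push_cast; ring
      · rw [if_neg hh, if_neg hh]; simp
    have hrun1_pos : 1 ≤ run1 := by rw [hrun1]; split_ifs <;> omega
    have hrun1_le : run1 ≤ k := by rw [hrun1]; split_ifs <;> omega
    -- new window (before any shrink): slice l .. r+1
    have hw' : (arr.take (r+1)).drop l = (arr.take r).drop l ++ [x] := by
      rw [htake, List.drop_append_of_le_length (by omega)]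
    -- d1 invariants for window slice l .. r+1
    have hnd1 : d1.keys.Nodup := by
      rw [hd1, PySem.Dict.keys_modify] at *
      exact PySem.Dict.nodup_keys_insert _ _ _ hnd
    have hm1 : ∀ y, y ∈ d1.keys ↔ y ∈ (arr.take (r+1)).drop l := by
      intro y
      rw [hd1, PySem.Dict.keys_modify, PySem.Dict.mem_keys_insert, hw']
      simp [hm y]
      tauto
    have hcnt1 : ∀ y, d1.getD y 0 = ((((arr.take (r+1)).drop l).count y : Nat) : Int) := by
      intro y
      rw [hd1, PySem.Dict.getD_modify, hw']
      by_cases hy : y = x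
      · subst hy
        rw [if_pos rfl, hcnt x]
        simp [List.count_append]
      · rw [if_neg hy, hcnt y]
        simp [List.count_append, List.count_singleton, hy]
        omega
    by_cases hc : ((r : Int) + 1) - (l : Int) = k
    · -- window reached size k
      rw [if_pos hc]
      have hlk : (l : Int) = (r : Int) + 1 - k := by omega
      have hwlen : (((arr.take (r+1)).drop l).length : Int) = k := by
        simp; push_cast; omega
      have hwne : (arr.take (r+1)).drop l ≠ [] := by
        intro h0; rw [h0] at hwlen; simp at hwlen; omega
      -- the all-equal test ↔ run1 = k
      have hkeyiff : d1.keys.length = 1 ↔ allEq ((arr.take (r+1)).drop l) :=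
        keys_length_one_iff _ _ hnd1 hm1 hwne
      have hrevdrop : ((arr.take (r+1)).drop l).reverse = (arr.take (r+1)).reverse.take k.toNat := by
        rw [List.reverse_drop]
        congr 1
        simp
        omega
      have halleq_rev : allEq ((arr.take (r+1)).drop l) ↔ allEq ((arr.take (r+1)).reverse.take k.toNat) := by
        rw [← hrevdrop]
        constructor <;> intro h a ha b hb <;>
          exact h a (by simpa using ha) b (by simpa using hb)
      have hlen_rev : k.toNat ≤ (arr.take (r+1)).reverse.length := by
        simp; omega
      have hmain : allEq ((arr.take (r+1)).reverse.take k.toNat) ↔ k.toNat ≤ hrun (arr.take (r+1)).reverse :=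
        allEq_take_iff_le_hrun _ _ (by omega) hlen_rev
      have hiff : d1.keys.length = 1 ↔ run1 = k := by
        rw [hkeyiff, halleq_rev, hmain]
        omega
      by_cases hone : d1.keys.length = 1
      · rw [if_pos hone, if_pos (hiff.mp hone)]
      · rw [if_neg hone]
        have hrun1k : run1 ≠ k := fun h => hone (hiff.mpr h)
        rw [if_neg hrun1k]
        -- A shrinks the window
        have hl1 : l < r + 1 := by omega
        have hl_lt : l < arr.length := by omega
        have hget_l : PySem.List.pyGetD arr (l : Int) 0 = arr[l] := by
          rw [PySem.List.pyGetD_natCast]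
          simp [List.getD, List.getElem?_eq_getElem hl_lt]
        rw [hget_l]
        set x0 := arr[l] with hx0
        have hwcons : (arr.take (r+1)).drop l = x0 :: (arr.take (r+1)).drop (l+1) := by
          rw [List.drop_eq_getElem_cons (by simp; omega)]
          congr 1
          exact List.getElem_take
        set w2 := (arr.take (r+1)).drop (l+1) with hw2
        set d2 := d1.modify x0 0 (· - 1) with hd2
        have hcnt2 : ∀ y, d2.getD y 0 = ((w2.count y : Nat) : Int) := by
          intro y
          rw [hd2, PySem.Dict.getD_modify]
          by_cases hy : y = x0
          · subst hy
            rw [if_pos rfl, hcnt1 x0, hwcons, List.count_cons_self]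
            push_cast; omega
          · rw [if_neg hy, hcnt1 y, hwcons]
            simp [List.count_cons, hy]
            omega
        have hx0w : x0 ∈ (arr.take (r+1)).drop l := by rw [hwcons]; simp
        have hkeys2 : d2.keys = d1.keys := by
          rw [hd2, PySem.Dict.keys_modify, PySem.Dict.keys_insert_of_contains]
          rw [PySem.Dict.contains_iff_mem_keys]
          exact (hm1 x0).mpr hx0w
        have hnd2 : d2.keys.Nodup := by rw [hkeys2]; exact hnd1
        -- the new window invariants, split on whether the count hit zero
        have hrun1_lt : run1 < k := lt_of_le_of_ne hrun1_le hrun1k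
        have hwin' : ((r : Int) + 1) - ((l : Int) + 1) = min ((r : Int) + 1) (k - 1) := by omega
        have hrun1hr : run1 = (hrun (arr.take (r+1)).reverse : Int) := hrun1_eq
        by_cases hzero : d2.getD x0 0 = 0
        · rw [if_pos hzero]
          have hx0notw2 : x0 ∉ w2 := by
            intro hmem
            have := hcnt2 x0
            rw [hzero] at this
            have : w2.count x0 = 0 := by omega
            exact (List.count_pos_iff.mpr hmem).ne' this
          have hnd3 : (d2.erase x0).keys.Nodup := by
            rw [dict_keys_erase]
            exact hnd2.filter _
          have hm3 : ∀ y, y ∈ (d2.erase x0).keys ↔ y ∈ w2 := by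
            intro y
            rw [dict_keys_erase, List.mem_filter]
            simp only [hkeys2, hm1 y, hwcons]
            constructor
            · rintro ⟨hy, hne⟩
              simp at hne
              simp at hy
              rcases hy with hy | hy
              · exact absurd hy hne
              · exact hy
            · intro hy
              constructor
              · simp; right; exact hy
              · simp
                intro he; subst he; exact hx0notw2 hy
          have hcnt3 : ∀ y, (d2.erase x0).getD y 0 = ((w2.count y : Nat) : Int) := by
            intro y
            rw [dict_getD_erase]
            by_cases hy : y = x0
            · subst hy
              rw [if_pos rfl]
              simp [List.count_eq_zero_of_not_mem hx0notw2]
            · rw [if_neg hy]; exact hcnt2 y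
          rw [← show (arr.take (r+1)).reverse.head? = some x from by rw [hrev1]; rfl]
          exact ih (r+1) (l+1) _ run1 (by omega) (by omega) (by omega) hwin' hnd3 hm3 hcnt3 hrun1hr hrun1_lt
        · rw [if_neg hzero]
          have hx0w2 : x0 ∈ w2 := by
            by_contra hmem
            apply hzero
            rw [hcnt2 x0, List.count_eq_zero_of_not_mem hmem]
            rfl
          have hm2 : ∀ y, y ∈ d2.keys ↔ y ∈ w2 := by
            intro y
            rw [hkeys2, hm1 y, hwcons]
            simp only [List.mem_cons]
            constructor
            · rintro (hy | hy)
              · subst hy; exact hx0w2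
              · exact hy
            · intro hy; right; exact hy
          rw [← show (arr.take (r+1)).reverse.head? = some x from by rw [hrev1]; rfl]
          exact ih (r+1) (l+1) _ run1 (by omega) (by omega) (by omega) hwin' hnd2 hm2 hcnt2 hrun1hr hrun1_lt
    · -- window still growing: l = 0, r < k - 1
      rw [if_neg hc]
      have hlz : (l : Int) = 0 ∧ (r : Int) < k - 1 := by
        constructor <;> omega
      have hrun1_ne : run1 ≠ k := by
        have h1 : (hrun (arr.take (r+1)).reverse : Int) ≤ ((arr.take (r+1)).reverse.length : Int) := by
          exact_mod_cast hrun_le_length _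
        have h2 : ((arr.take (r+1)).reverse.length : Int) ≤ (r : Int) + 1 := by
          simp
        rw [hrun1_eq]
        omega
      rw [if_neg hrun1_ne]
      have hwin' : ((r : Int) + 1) - (l : Int) = min ((r : Int) + 1) (k - 1) := by omega
      have hprev : (arr.take (r+1)).reverse.head? = some x := by rw [hrev1]; rfl
      rw [← hprev]
      have hrun1_lt : run1 < k := lt_of_le_of_ne hrun1_le hrun1_ne
      exact ih (r+1) l _ run1 (by omega) (by omega) (by omega) hwin' hnd1 hm1 hcnt1 hrun1_eq hrun1_lt

-- ===== VERDICT (by name: the statement is the Claim_ definition above) =====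
theorem has_enduring_best_seller_streak_spec : Claim_equal_has_enduring_best_seller_streak := by
  intro arr k _
  show has_enduring_best_seller_streak arr k = has_enduring_best_seller_streak_alt arr k
  unfold has_enduring_best_seller_streak has_enduring_best_seller_streak_alt
  by_cases hk : 1 ≤ k
  · have := loop_eq arr k hk (arr.length - 0) 0 0 PySem.Dict.empty 0 rfl
      (by omega) (by omega) (by simp; omega)
      (by simp [PySem.Dict.keys, PySem.Dict.empty])
      (by intro y; simp [PySem.Dict.keys, PySem.Dict.empty])
      (by intro y; simp [PySem.Dict.getD, PySem.Dict.get?, PySem.Dict.empty])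
      (by simp [hrun]) (by omega)
    simpa using this
  · rw [pvA_loop_false_of_nonpos arr k (by omega) (arr.length - 0) 0 0 _ rfl (by omega),
        pvB_loop_false_of_nonpos k (by omega) arr none 0 (by omega)]
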